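-- pv_equiv track=rewrite | github.com/renCosta2025/bluetooth-mcp-server | app/utils/bluetooth_utils.py | decode_ascii_name
-- ===== SOURCE A (Python) =====
-- def decode_ascii_name(encoded_name: str) -> str:
--     """
--     Décode une chaîne de caractères représentant des codes ASCII séparés par des espaces.
--
--     Args:
--         encoded_name: Chaîne encodée (ex: "105 80 104 111 110 101 0")
--
--     Returns:
--         Chaîne décodée (ex: "iPhone")
--     """
--     if not encoded_name or not isinstance(encoded_name, str):
--         return encoded_name
--
--     # Vérifier si la chaîne ressemble à des codes ASCII
--     if not all(c.isdigit() or c.isspace() for c in encoded_name):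
--         return encoded_name
--
--     try:
--         # Convertir les codes ASCII en caractères
--         values = [int(code) for code in encoded_name.split() if code.isdigit()]
--         # Arrêter au premier 0 (null terminator)
--         if 0 in values:
--             values = values[:values.index(0)]
--         # Convertir en chaîne de caractères si les valeurs sont dans la plage ASCII imprimable
--         decoded = ''.join(chr(code) for code in values if 32 <= code <= 126)
--
--         # Retourner la chaîne décodée seulement si elle contient au moins 2 caractères et semble être un nom valide
--         if len(decoded) >= 2 and any(c.isalpha() for c in decoded):
--             return decoded
--         return encoded_name
--     except Exception:
--         return encoded_name
-- ===== SOURCE B (Python) =====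
-- def decode_ascii_name(encoded_name: str) -> str:
--     """
--     Decode une chaine de codes ASCII separes par des espaces (voir A);
--     un seul balayage caractere par caractere avec un accumulateur numerique:
--     pas de split(), pas de int(), pas de liste de valeurs intermediaire.
--     """
--     if not encoded_name or not isinstance(encoded_name, str):
--         return encoded_name
--
--     if not all(c.isdigit() or c.isspace() for c in encoded_name):
--         return encoded_name
--
--     out = []
--     value = -1                      # -1: aucun nombre en cours
--     for c in encoded_name + " ":    # espace sentinelle: vide le dernier nombre
--         if c.isdigit():
--             value = max(value, 0) * 10 + (ord(c) - ord("0"))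
--         else:
--             if value == 0:          # terminateur nul: tout le reste est ignore
--                 break
--             if 32 <= value <= 126:
--                 out.append(chr(value))
--             value = -1
--
--     decoded = "".join(out)
--     if len(decoded) >= 2 and any(c.isalpha() for c in decoded):
--         return decoded
--     return encoded_name
-- ===== Notes on version B (the rewrite author's own statement) =====
-- stated objective: alternative
-- what changed: B replaces A's token pipeline (split, per-token int(), zero-membership test, index+slice, filter-join) by a single character-level scan that folds each run of digits into a numeric accumulator, appends the corresponding character at each whitespace boundary when the value is printable ASCII, and breaks at the first zero-valued number; no split(), no int(), no intermediate list of values.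
import Mathlib
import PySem

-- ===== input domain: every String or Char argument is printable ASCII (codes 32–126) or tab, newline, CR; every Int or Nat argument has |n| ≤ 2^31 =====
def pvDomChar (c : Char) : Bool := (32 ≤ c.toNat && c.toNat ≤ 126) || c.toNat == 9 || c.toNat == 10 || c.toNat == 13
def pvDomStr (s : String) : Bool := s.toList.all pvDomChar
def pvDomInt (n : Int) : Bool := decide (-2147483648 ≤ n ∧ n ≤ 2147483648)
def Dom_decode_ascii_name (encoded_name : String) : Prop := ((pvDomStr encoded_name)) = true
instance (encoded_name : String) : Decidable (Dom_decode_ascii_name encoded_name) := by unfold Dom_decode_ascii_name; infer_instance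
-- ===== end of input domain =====

-- B replaces A's token pipeline (split, per-token int(), 0-membership test, index+slice,
-- filter-join) by a single character-level scan with a numeric accumulator; same return value,
-- no speed claim.

-- ===== PORT A =====
-- `int(t)` for a token that passed `t.isdigit()`: on the stated ASCII domain such a token is a
-- nonempty run of '0'..'9', where Python's int() is exactly this base-10 fold and never raises
-- (so A's `except` path is unreachable there); exact on Dom_decode_ascii_name.
def aIntDigits (t : List Char) : Int :=
  t.foldl (fun a c => a * 10 + ((c.toNat : Int) - 48)) 0

def decode_ascii_name (encoded_name : String) : String :=
  -- `if not encoded_name or not isinstance(encoded_name, str)` (the isinstance test is always false here)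
  if encoded_name = "" then encoded_name
  else if !(encoded_name.toList.all (fun c => PySem.Chars.isdigit c || PySem.Chars.isspace c)) then encoded_name
  else
    -- `values = [int(code) for code in encoded_name.split() if code.isdigit()]`
    let values0 := (PySem.Str.split₀ encoded_name).filterMap
      (fun t => if PySem.Str.strIsdigit t then some (aIntDigits t.toList) else none)
    -- `if 0 in values: values = values[:values.index(0)]`
    let values :=
      if (0 : Int) ∈ values0 then
        match PySem.List.index? values0 0 with
        | some i => PySem.List.slice values0 none (some (i : Int))
        | none => values0     -- unreachable: guarded by `0 ∈ values0`
      else values0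
    -- `''.join(chr(code) for code in values if 32 <= code <= 126)`;
    -- Char.ofNat is exact for chr on the guarded range 32..126
    let decoded := values.filterMap
      (fun code => if 32 ≤ code ∧ code ≤ 126 then some (Char.ofNat code.toNat) else none)
    if 2 ≤ decoded.length ∧ decoded.any PySem.Chars.isalpha then String.ofList decoded
    else encoded_name

-- ===== PORT B =====
-- Source B's for-loop over the characters of `encoded_name + " "`; state = (value, out);
-- `break` is the early return of `out`. Char.ofNat is exact for chr on the guarded range 32..126.
def bScan (cs : List Char) (value : Int) (out : List Char) : List Char :=
  match cs with
  | [] => out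
  | c :: rest =>
    if PySem.Chars.isdigit c then
      bScan rest (max value 0 * 10 + ((c.toNat : Int) - 48)) out
    else if value = 0 then out                                   -- `break`
    else if 32 ≤ value ∧ value ≤ 126 then
      bScan rest (-1) (out ++ [Char.ofNat value.toNat])          -- `out.append(chr(value))`
    else bScan rest (-1) out

def decode_ascii_name_alt (encoded_name : String) : String :=
  if encoded_name = "" then encoded_name
  else if !(encoded_name.toList.all (fun c => PySem.Chars.isdigit c || PySem.Chars.isspace c)) then encoded_name
  else
    let decoded := bScan (encoded_name.toList ++ [' ']) (-1) []
    if 2 ≤ decoded.length ∧ decoded.any PySem.Chars.isalpha then String.ofList decoded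
    else encoded_name

-- ===== PRECONDITION & SPEC =====
def Spec_decode_ascii_name (encoded_name : String) (out : String) : Prop := out = decode_ascii_name_alt encoded_name
instance (encoded_name : String) (out : String) : Decidable (Spec_decode_ascii_name encoded_name out) := by unfold Spec_decode_ascii_name; infer_instance

-- ===== CLAIM (what is proved, stated in full; the proofs are below) =====
def Claim_equal_decode_ascii_name : Prop := ∀ (encoded_name : String), Dom_decode_ascii_name encoded_name → Spec_decode_ascii_name encoded_name (decode_ascii_name encoded_name)

-- ===== LEMMAS AND PROOFS =====

-- the character filter of A's final join
def pvChr (code : Int) : Option Char :=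
  if 32 ≤ code ∧ code ≤ 126 then some (Char.ofNat code.toNat) else none

-- A's truncation-then-filter applied to a list of token values
def aFin (vs : List Int) : List Char :=
  (vs.takeWhile (fun v => decide (v ≠ 0))).filterMap pvChr

lemma isdigit_not_isspace (c : Char) (h : PySem.Chars.isdigit c = true) :
    PySem.Chars.isspace c = false := by
  simp [PySem.Chars.isdigit] at h
  simp [PySem.Chars.isspace]
  have h1 : 48 ≤ c.toNat := h.1
  have h2 : c.toNat ≤ 57 := h.2
  omega

lemma aIntDigits_nonneg (t : List Char) (h : ∀ c ∈ t, PySem.Chars.isdigit c = true) :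
    0 ≤ aIntDigits t := by
  suffices H : ∀ a : Int, 0 ≤ a → 0 ≤ t.foldl (fun a c => a * 10 + ((c.toNat : Int) - 48)) a from
    H 0 le_rfl
  induction t with
  | nil => intro a ha; simpa using ha
  | cons c rest ih =>
    intro a ha
    have hc := h c (List.mem_cons_self)
    simp [PySem.Chars.isdigit] at hc
    have : (0:Int) ≤ a * 10 + ((c.toNat : Int) - 48) := by
      have h1 : 48 ≤ c.toNat := hc.1
      have : (48:Int) ≤ (c.toNat : Int) := by exact_mod_cast h1
      nlinarith
    exact ih (fun c hm => h c (List.mem_cons_of_mem _ hm)) _ this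

lemma aIntDigits_append (t : List Char) (c : Char) :
    aIntDigits (t ++ [c]) = aIntDigits t * 10 + ((c.toNat : Int) - 48) := by
  simp [aIntDigits, List.foldl_append]

lemma split₀_go_acc (cs : List Char) (cur : List Char) (acc : List (List Char)) :
    PySem.Chars.split₀.go cs cur acc = acc.reverse ++ PySem.Chars.split₀.go cs cur [] := by
  induction cs generalizing cur acc with
  | nil => simp [PySem.Chars.split₀.go]; split_ifs <;> simp
  | cons c rest ih =>
    simp only [PySem.Chars.split₀.go]
    split_ifs with h1 h2
    · exact ih [] acc
    · rw [ih [] (cur.reverse :: acc), ih [] [cur.reverse]]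
      simp
    · exact ih (c :: cur) acc

lemma split₀_go_tokens (cs : List Char) (cur : List Char)
    (hall : ∀ c ∈ cs, PySem.Chars.isdigit c || PySem.Chars.isspace c)
    (hcur : ∀ c ∈ cur, PySem.Chars.isdigit c = true) :
    ∀ t ∈ PySem.Chars.split₀.go cs cur [], t ≠ [] ∧ ∀ c ∈ t, PySem.Chars.isdigit c = true := by
  induction cs generalizing cur with
  | nil =>
    intro t ht
    simp [PySem.Chars.split₀.go] at ht
    obtain ⟨hne, rfl⟩ := ht
    exact ⟨by simpa using hne, fun c hc => hcur c (by simpa using hc)⟩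
  | cons c rest ih =>
    intro t ht
    have hc := hall c (List.mem_cons_self)
    simp only [PySem.Chars.split₀.go] at ht
    split_ifs at ht with h1 h2
    · exact ih [] (fun c hm => hall c (List.mem_cons_of_mem _ hm)) (by simp) t ht
    · rw [split₀_go_acc] at ht
      simp at ht
      rcases ht with ht | ht
      · subst ht
        refine ⟨by simpa [List.isEmpty_iff] using h2, fun c hc => hcur c (by simpa using hc)⟩
      · exact ih [] (fun c hm => hall c (List.mem_cons_of_mem _ hm)) (by simp) t ht
    · have hcd : PySem.Chars.isdigit c = true := by
        rcases Bool.or_eq_true_iff.mp hc with h | h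
        · exact h
        · simp [h] at h1
      refine ih (c :: cur) (fun c hm => hall c (List.mem_cons_of_mem _ hm)) ?_ t ht
      intro x hx
      rcases List.mem_cons.mp hx with rfl | hx
      · exact hcd
      · exact hcur x hx

lemma aFin_cons (v : Int) (vs : List Int) :
    aFin (v :: vs) = if v = 0 then [] else (pvChr v).toList ++ aFin vs := by
  by_cases h : v = 0
  · simp [aFin, h]
  · simp only [aFin, List.takeWhile_cons, decide_eq_true_eq, h]
    simp [h, List.filterMap_cons]
    cases hc : pvChr v <;> simp

lemma bScan_go (cs : List Char) (cur : List Char) (out : List Char)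
    (hall : ∀ c ∈ cs, PySem.Chars.isdigit c || PySem.Chars.isspace c)
    (hcur : ∀ c ∈ cur, PySem.Chars.isdigit c = true) :
    bScan (cs ++ [' ']) (if cur.isEmpty then -1 else aIntDigits cur.reverse) out
      = out ++ aFin ((PySem.Chars.split₀.go cs cur []).map aIntDigits) := by
  induction cs generalizing cur out with
  | nil =>
    have hsp : PySem.Chars.isdigit ' ' = false := by decide
    cases cur with
    | nil => simp [bScan, PySem.Chars.split₀.go, aFin, hsp]
    | cons d ds =>
      have hcur' : ∀ x ∈ ds.reverse ++ [d], PySem.Chars.isdigit x = true := by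
        intro x hx
        refine hcur x ?_
        rcases List.mem_append.mp hx with hx | hx
        · exact List.mem_cons_of_mem _ (List.mem_reverse.mp hx)
        · simp at hx; simp [hx]
      have hv : 0 ≤ aIntDigits (ds.reverse ++ [d]) := aIntDigits_nonneg _ hcur'
      simp only [List.isEmpty_cons, Bool.false_eq_true, if_false, List.nil_append, bScan, hsp,
        List.reverse_cons]
      simp only [PySem.Chars.split₀.go, List.isEmpty_cons, Bool.false_eq_true, if_false,
        List.reverse_cons, List.reverse_nil, List.nil_append, List.map_cons, List.map_nil]
      rw [aFin_cons]
      by_cases h0 : aIntDigits (ds.reverse ++ [d]) = 0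
      · simp [h0]
      · rw [if_neg h0, if_neg h0]
        by_cases hr : 32 ≤ aIntDigits (ds.reverse ++ [d]) ∧ aIntDigits (ds.reverse ++ [d]) ≤ 126
        · simp [hr, pvChr, aFin]
        · simp [hr, pvChr, aFin]
  | cons c rest ih =>
    have hrest : ∀ x ∈ rest, PySem.Chars.isdigit x || PySem.Chars.isspace x :=
      fun x hx => hall x (List.mem_cons_of_mem _ hx)
    by_cases hd : PySem.Chars.isdigit c = true
    · -- digit: extend the pending token
      have hns := isdigit_not_isspace c hd
      have hval : max (if cur.isEmpty then (-1:Int) else aIntDigits cur.reverse) 0 * 10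
          + ((c.toNat : Int) - 48) = aIntDigits (cur.reverse ++ [c]) := by
        rw [aIntDigits_append]
        cases cur with
        | nil => simp [aIntDigits]
        | cons d ds =>
          have hcur' : ∀ x ∈ ds.reverse ++ [d], PySem.Chars.isdigit x = true := by
            intro x hx
            refine hcur x ?_
            rcases List.mem_append.mp hx with hx | hx
            · exact List.mem_cons_of_mem _ (List.mem_reverse.mp hx)
            · simp at hx; simp [hx]
          have hv : 0 ≤ aIntDigits (ds.reverse ++ [d]) := aIntDigits_nonneg _ hcur'
          simp only [List.isEmpty_cons, Bool.false_eq_true, if_false, List.reverse_cons]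
          rw [max_eq_left hv]
      simp only [List.cons_append, bScan, hd, if_pos, hval]
      have hih := ih (c :: cur) out hrest (by
        intro x hx
        rcases List.mem_cons.mp hx with rfl | hx
        · exact hd
        · exact hcur x hx)
      simp only [List.isEmpty_cons, Bool.false_eq_true, if_false, List.reverse_cons] at hih
      rw [hih]
      simp only [PySem.Chars.split₀.go, hns, Bool.false_eq_true, if_false]
    · -- space: flush the pending token
      have hsp : PySem.Chars.isspace c = true := by
        rcases Bool.or_eq_true_iff.mp (hall c List.mem_cons_self) with h | h
        · exact absurd h hd
        · exact h
      cases cur with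
      | nil =>
        simp only [List.isEmpty_nil, if_pos, List.cons_append, bScan, hd, Bool.false_eq_true,
          if_false]
        rw [if_neg (by norm_num), if_neg (by norm_num)]
        have hih := ih [] out hrest (by simp)
        simp only [List.isEmpty_nil, if_pos] at hih
        rw [hih]
        simp only [PySem.Chars.split₀.go, hsp, if_pos, List.isEmpty_nil]
      | cons d ds =>
        have hcur' : ∀ x ∈ ds.reverse ++ [d], PySem.Chars.isdigit x = true := by
          intro x hx
          refine hcur x ?_
          rcases List.mem_append.mp hx with hx | hx
          · exact List.mem_cons_of_mem _ (List.mem_reverse.mp hx)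
          · simp at hx; simp [hx]
        have hv : 0 ≤ aIntDigits (ds.reverse ++ [d]) := aIntDigits_nonneg _ hcur'
        simp only [List.isEmpty_cons, Bool.false_eq_true, if_false, List.cons_append, bScan,
          hd, List.reverse_cons]
        simp only [PySem.Chars.split₀.go, hsp, if_pos, List.isEmpty_cons, Bool.false_eq_true,
          if_false]
        rw [split₀_go_acc rest [] [(d :: ds).reverse], List.map_append]
        simp only [List.reverse_cons, List.reverse_nil, List.nil_append, List.map_cons,
          List.map_nil, List.cons_append, List.nil_append]
        rw [aFin_cons]
        by_cases h0 : aIntDigits (ds.reverse ++ [d]) = 0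
        · simp [h0]
        · rw [if_neg h0, if_neg h0]
          by_cases hr : 32 ≤ aIntDigits (ds.reverse ++ [d]) ∧ aIntDigits (ds.reverse ++ [d]) ≤ 126
          · rw [if_pos hr]
            have hih := ih [] (out ++ [Char.ofNat (aIntDigits (ds.reverse ++ [d])).toNat]) hrest
              (by simp)
            simp only [List.isEmpty_nil, if_pos] at hih
            rw [hih]
            simp [pvChr, hr]
          · rw [if_neg hr]
            have hih := ih [] out hrest (by simp)
            simp only [List.isEmpty_nil, if_pos] at hih
            rw [hih]
            simp [pvChr, hr]

-- a filterMap whose test passes on every element is a map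
lemma filterMap_if_eq_map {α β : Type} (p : α → Bool) (g : α → β) (ts : List α)
    (h : ∀ t ∈ ts, p t = true) :
    ts.filterMap (fun t => if p t then some (g t) else none) = ts.map g := by
  induction ts with
  | nil => rfl
  | cons t rest ih =>
    simp [h t List.mem_cons_self,
      ih (fun x hx => h x (List.mem_cons_of_mem _ hx))]

-- A's `0 in values` / `values.index(0)` / slice = takeWhile (· ≠ 0)
lemma trunc_eq (vs : List Int) :
    (if (0 : Int) ∈ vs then
        match PySem.List.index? vs 0 with
        | some i => PySem.List.slice vs none (some (i : Int))
        | none => vs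
      else vs) = vs.takeWhile (fun v => decide (v ≠ 0)) := by
  induction vs with
  | nil => simp
  | cons v rest ih =>
    by_cases h0 : v = 0
    · subst h0
      rw [if_pos (List.mem_cons_self), PySem.List.index?_cons_self]
      show PySem.List.slice ((0 : Int) :: rest) none (some ((0 : Nat) : Int)) = _
      rw [PySem.List.slice_to_natCast]
      simp
    · have hv0 : v ≠ (0 : Int) := h0
      by_cases hm : (0 : Int) ∈ rest
      · cases hi : PySem.List.index? rest 0 with
        | none =>
          exact absurd ((PySem.List.index?_eq_none_iff _ _).mp hi) (by simpa using hm)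
        | some i =>
          have ihx : List.take i rest = rest.takeWhile (fun v => decide (v ≠ 0)) := by
            have h := ih
            rw [if_pos hm, hi] at h
            have h' : PySem.List.slice rest none (some ((i : Nat) : Int)) =
                rest.takeWhile (fun v => decide (v ≠ 0)) := h
            rwa [PySem.List.slice_to_natCast] at h'
          have hstep : PySem.List.index? (v :: rest) 0 = (PySem.List.index? rest 0).map (· + 1) :=
            PySem.List.index?_cons_of_ne _ hv0
          rw [if_pos (List.mem_cons_of_mem _ hm), hstep, hi, Option.map_some]
          show PySem.List.slice (v :: rest) none (some (((i + 1 : Nat)) : Int)) = _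
          rw [PySem.List.slice_to_natCast, List.take_succ_cons, List.takeWhile_cons, ihx]
          simp [h0]
      · have h := ih
        rw [if_neg hm] at h
        have h' : (fun (v : Int) => decide (v ≠ 0)) = (fun v => !decide (v = 0)) := by
          funext w; simp [decide_not]
        rw [if_neg (by simp [hm, Ne.symm hv0]), List.takeWhile_cons]
        rw [h'] at h
        simp [h0, ← h]

-- ===== VERDICT (by name: the statement is the Claim_ definition above) =====
theorem decode_ascii_name_spec : Claim_equal_decode_ascii_name := by
  intro s _
  unfold Spec_decode_ascii_name decode_ascii_name decode_ascii_name_alt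
  by_cases h1 : s = ""
  · simp [h1]
  · rw [if_neg h1, if_neg h1]
    by_cases h2 : s.toList.all (fun c => PySem.Chars.isdigit c || PySem.Chars.isspace c) = true
    · simp only [h2, Bool.not_true, Bool.false_eq_true, if_false]
      have hall : ∀ c ∈ s.toList, PySem.Chars.isdigit c || PySem.Chars.isspace c :=
        fun c hc => (List.all_eq_true.mp h2) c hc
      have htok := split₀_go_tokens s.toList [] hall (by simp)
      have hsplit : PySem.Chars.split₀ s.toList = PySem.Chars.split₀.go s.toList [] [] := rfl
      have hv0 : (PySem.Str.split₀ s).filterMap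
            (fun t => if PySem.Str.strIsdigit t then some (aIntDigits t.toList) else none)
          = (PySem.Chars.split₀ s.toList).map aIntDigits := by
        rw [filterMap_if_eq_map]
        · rw [show (fun t : String => aIntDigits t.toList)
              = (aIntDigits ∘ String.toList) from rfl, ← List.map_map,
            PySem.Str.split₀_map_toList]
        · intro t ht
          have htl : t.toList ∈ PySem.Chars.split₀ s.toList := by
            rw [← PySem.Str.split₀_map_toList]
            exact List.mem_map_of_mem ht
          rw [hsplit] at htl
          obtain ⟨hne, hdig⟩ := htok t.toList htl
          rw [PySem.Str.strIsdigit_eq]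
          simp [PySem.Chars.strIsdigit, hne, List.all_eq_true]
          exact hdig
      have hb := bScan_go s.toList [] [] hall (by simp)
      simp only [List.isEmpty_nil, if_pos, List.nil_append] at hb
      rw [hv0, trunc_eq, hb, hsplit]
      rfl
    · simp [h2]
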